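-- pv_equiv track=rewrite | github.com/Espanholcomvoce/Site-de-vendas-Espanhol-com-Voc- | site-vendas/build_index.py | scope_rules
-- ===== SOURCE A (Python) =====
-- def scope_selector(selector, scope_id):
--     parts = [s.strip() for s in selector.split(',')]
--     scoped = []
--     for part in parts:
--         if not part:
--             continue
--         if part in (':root', 'html', '*'):
--             scoped.append(part)
--         elif part == 'body' or part.startswith('body ') or part.startswith('body.'):
--             scoped.append(part.replace('body', '#' + scope_id, 1))
--         else:
--             scoped.append('#' + scope_id + ' ' + part)
--     return ', '.join(scoped)
--
-- def scope_rules(css, scope_id):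
--     output = []
--     i = 0
--     length = len(css)
--     while i < length:
--         while i < length and css[i] in ' \t\n\r':
--             output.append(css[i])
--             i += 1
--         if i >= length:
--             break
--         if css[i:i+2] == '/*':
--             end = css.find('*/', i+2)
--             if end == -1:
--                 output.append(css[i:])
--                 break
--             output.append(css[i:end+2])
--             i = end + 2
--             continue
--         brace_pos = css.find('{', i)
--         if brace_pos == -1:
--             output.append(css[i:])
--             break
--         selector = css[i:brace_pos].strip()
--         j = brace_pos + 1
--         depth = 1
--         while j < length and depth > 0:
--             if css[j] == '{': depth += 1
--             elif css[j] == '}': depth -= 1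
--             j += 1
--         body_block = css[brace_pos:j]
--         if selector and not selector.startswith('@'):
--             scoped = scope_selector(selector, scope_id)
--             output.append(scoped + ' ' + body_block)
--         else:
--             output.append(selector + ' ' + body_block)
--         i = j
--     return ''.join(output)
-- ===== SOURCE B (Python) =====
-- def _scope_part(part, scope_id):
--     if part in (':root', 'html', '*'):
--         return part
--     if part == 'body' or part[:5] in ('body ', 'body.'):
--         return '#' + scope_id + part[4:]
--     return '#' + scope_id + ' ' + part
--
-- def scope_selector(selector, scope_id):
--     parts = [p for p in map(str.strip, selector.split(',')) if p]
--     return ', '.join(_scope_part(p, scope_id) for p in parts)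
--
-- def scope_rules(css, scope_id):
--     # phase 1: segment the stylesheet into literal pieces and (selector, block) rules
--     segs = []
--     rest = css
--     while rest:
--         n = 0
--         while n < len(rest) and rest[n] in ' \t\n\r':
--             n += 1
--         if n:
--             segs.append((False, rest[:n], ''))
--             rest = rest[n:]
--         if not rest:
--             break
--         if rest.startswith('/*'):
--             e = rest[2:].find('*/')
--             if e == -1:
--                 segs.append((False, rest, ''))
--                 break
--             segs.append((False, rest[:e + 4], ''))
--             rest = rest[e + 4:]
--             continue
--         b = rest.find('{')
--         if b == -1:
--             segs.append((False, rest, ''))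
--             break
--         j = b + 1
--         depth = 1
--         while j < len(rest) and depth:
--             if rest[j] == '{':
--                 depth += 1
--             elif rest[j] == '}':
--                 depth -= 1
--             j += 1
--         segs.append((True, rest[:b], rest[b:j]))
--         rest = rest[j:]
--     # phase 2: render the segments
--     out = []
--     for is_rule, text, block in segs:
--         if not is_rule:
--             out.append(text)
--         else:
--             sel = text.strip()
--             if sel and not sel.startswith('@'):
--                 out.append(scope_selector(sel, scope_id) + ' ' + block)
--             else:
--                 out.append(sel + ' ' + block)
--     return ''.join(out)
-- ===== Notes on version B (the rewrite author's own statement) =====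
-- stated objective: alternative
-- what changed: B splits A's single interleaved scan into two phases: a tokenizer that produces a list of tagged segments (literal text vs selector/block rules, with raw unstripped selectors and comment offsets computed on the suffix after '/*'), and a renderer that scopes and joins them; scope_selector is rewritten as a filtered comprehension over a per-part helper using slicing instead of str.replace.
import Mathlib
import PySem

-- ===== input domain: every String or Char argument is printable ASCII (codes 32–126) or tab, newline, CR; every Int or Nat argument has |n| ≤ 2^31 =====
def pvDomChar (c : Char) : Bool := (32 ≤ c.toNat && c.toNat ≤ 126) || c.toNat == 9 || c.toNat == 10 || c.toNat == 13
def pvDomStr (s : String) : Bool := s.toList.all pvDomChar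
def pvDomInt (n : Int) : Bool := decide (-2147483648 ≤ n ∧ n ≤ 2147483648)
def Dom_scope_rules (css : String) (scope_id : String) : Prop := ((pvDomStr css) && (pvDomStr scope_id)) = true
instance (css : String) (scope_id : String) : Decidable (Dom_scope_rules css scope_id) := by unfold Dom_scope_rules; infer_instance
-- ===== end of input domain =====

-- B re-decomposes A's interleaved scanner into two phases (segment the stylesheet, then render the
-- segments); equivalence of the two decompositions is proved for ALL string inputs (both are total).

-- ===== PORT A =====
-- A is ported over List Char; the scan position i is represented by the remaining suffix css[i:],
-- so every index computed below is relative to that suffix (Python's css.find(sub, i+k) becomes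
-- PySem.Chars.findFrom rest sub k).
def pvWsA (c : Char) : Bool := (" \t\n\r".toList).contains c

-- hand port of Python's s.replace(old, new, 1) (not in PySem): first occurrence via Chars.find; exact
def pvReplace1 (s old new : List Char) : List Char :=
  let k := PySem.Chars.find s old
  if k = -1 then s else s.take k.toNat ++ new ++ s.drop (k.toNat + old.length)

-- A's inner 'while j < length and depth > 0' loop, counting the consumed characters (j - (brace_pos+1))
def pvBraceLoopA : List Char → Nat → Nat
  | [], _ => 0
  | c :: t, depth =>
    if depth = 0 then 0
    else 1 + pvBraceLoopA t (if c = '{' then depth + 1 else if c = '}' then depth - 1 else depth)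

def pvScopeSelectorA (sel sid : List Char) : List Char :=
  let parts := (PySem.Chars.splitOn sel [',']).map PySem.Chars.strip
  let res := parts.foldl (fun acc part =>
    if part = [] then acc
    else if part = ":root".toList ∨ part = "html".toList ∨ part = "*".toList then acc ++ [part]
    else if part = "body".toList ∨ PySem.Chars.startswith part "body ".toList = true ∨ PySem.Chars.startswith part "body.".toList = true then
      acc ++ [pvReplace1 part "body".toList ('#' :: sid)]
    else acc ++ [('#' :: sid) ++ [' '] ++ part]) []
  PySem.Chars.join ", ".toList res

def pvLoopA (cs sid : List Char) : List (List Char) :=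
  let ws := cs.takeWhile pvWsA
  let rest := cs.dropWhile pvWsA
  let wsOut := ws.map (fun c => [c])
  if hr : rest = [] then wsOut
  else if rest.take 2 = "/*".toList then
    let e := PySem.Chars.findFrom rest "*/".toList 2
    if e = -1 then wsOut ++ [rest]
    else wsOut ++ [rest.take (e.toNat + 2)] ++ pvLoopA (rest.drop (e.toNat + 2)) sid
  else
    let bp := PySem.Chars.find rest ['{']
    if bp = -1 then wsOut ++ [rest]
    else
      let selector := PySem.Chars.strip (rest.take bp.toNat)
      let k := pvBraceLoopA (rest.drop (bp.toNat + 1)) 1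
      let body := (rest.drop bp.toNat).take (1 + k)
      let piece := if selector ≠ [] ∧ PySem.Chars.startswith selector ['@'] = false
        then pvScopeSelectorA selector sid ++ [' '] ++ body
        else selector ++ [' '] ++ body
      wsOut ++ [piece] ++ pvLoopA (rest.drop (bp.toNat + 1 + k)) sid
termination_by cs.length
decreasing_by
  · have h1 := List.length_dropWhile_le pvWsA cs
    have h2 : 0 < (cs.dropWhile pvWsA).length := List.length_pos_of_ne_nil hr
    simp only [List.length_drop]; omega
  · have h1 := List.length_dropWhile_le pvWsA cs
    have h2 : 0 < (cs.dropWhile pvWsA).length := List.length_pos_of_ne_nil hr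
    simp only [List.length_drop]; omega

def scope_rules (css : String) (scope_id : String) : String :=
  String.ofList (PySem.Chars.join [] (pvLoopA css.toList scope_id.toList))

-- ===== PORT B =====
def pvWsB (c : Char) : Bool := (" \t\n\r".toList).contains c

inductive PvSeg
  | lit : List Char → PvSeg
  | rule : List Char → List Char → PvSeg

-- Source B's depth loop over the characters after the opening brace, counting how many it consumes
def pvScanBlockB : Nat → List Char → Nat
  | 0, _ => 0
  | _ + 1, [] => 0
  | d + 1, c :: t =>
      1 + pvScanBlockB (if c = '{' then d + 2 else if c = '}' then d else d + 1) t

def pvScopePartB (sid part : List Char) : List Char :=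
  if part = ":root".toList ∨ part = "html".toList ∨ part = "*".toList then part
  else if part = "body".toList ∨ part.take 5 = "body ".toList ∨ part.take 5 = "body.".toList then
    ('#' :: sid) ++ part.drop 4
  else ('#' :: sid) ++ ' ' :: part

def pvScopeSelectorB (sel sid : List Char) : List Char :=
  PySem.Chars.join ", ".toList
    ((((PySem.Chars.splitOn sel [',']).map PySem.Chars.strip).filter (· ≠ ([] : List Char))).map (pvScopePartB sid))

-- phase 1: segmentation
def pvTokenizeB (cs : List Char) : List PvSeg :=
  if cs = [] then []
  else
    let w := cs.takeWhile pvWsB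
    let wsSeg : List PvSeg := if w = [] then [] else [.lit w]
    let rest := cs.dropWhile pvWsB
    if hr : rest = [] then wsSeg
    else if PySem.Chars.startswith rest "/*".toList then
      let e := PySem.Chars.find (rest.drop 2) "*/".toList
      if e = -1 then wsSeg ++ [.lit rest]
      else wsSeg ++ .lit (rest.take (e.toNat + 4)) :: pvTokenizeB (rest.drop (e.toNat + 4))
    else
      let b := PySem.Chars.find rest ['{']
      if b = -1 then wsSeg ++ [.lit rest]
      else
        let k := pvScanBlockB 1 (rest.drop (b.toNat + 1))
        wsSeg ++ .rule (rest.take b.toNat) ((rest.drop b.toNat).take (1 + k)) :: pvTokenizeB (rest.drop (b.toNat + 1 + k))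
termination_by cs.length
decreasing_by
  · have h1 := List.length_dropWhile_le pvWsB cs
    have h2 : 0 < (cs.dropWhile pvWsB).length := List.length_pos_of_ne_nil hr
    simp only [List.length_drop]; omega
  · have h1 := List.length_dropWhile_le pvWsB cs
    have h2 : 0 < (cs.dropWhile pvWsB).length := List.length_pos_of_ne_nil hr
    simp only [List.length_drop]; omega

-- phase 2: rendering
def pvRenderB (sid : List Char) : PvSeg → List Char
  | .lit s => s
  | .rule selRaw blk =>
    let sel := PySem.Chars.strip selRaw
    if sel ≠ [] ∧ PySem.Chars.startswith sel ['@'] = false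
    then pvScopeSelectorB sel sid ++ ' ' :: blk
    else sel ++ ' ' :: blk

def scope_rules_alt (css : String) (scope_id : String) : String :=
  String.ofList (((pvTokenizeB css.toList).map (pvRenderB scope_id.toList)).flatten)

-- ===== PRECONDITION & SPEC =====
def Spec_scope_rules (css : String) (scope_id : String) (out : String) : Prop := out = scope_rules_alt css scope_id
instance (css : String) (scope_id : String) (out : String) : Decidable (Spec_scope_rules css scope_id out) := by unfold Spec_scope_rules; infer_instance

-- ===== CLAIM (what is proved, stated in full; the proofs are below) =====
def Claim_equal_scope_rules : Prop := ∀ (css : String) (scope_id : String), Dom_scope_rules css scope_id → Spec_scope_rules css scope_id (scope_rules css scope_id)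

-- ===== LEMMAS AND PROOFS =====
theorem pvJoinNil (ls : List (List Char)) : PySem.Chars.join [] ls = ls.flatten := by
  induction ls with
  | nil => simp [PySem.Chars.join, List.intercalate]
  | cons a t ih =>
    cases t with
    | nil => simp [PySem.Chars.join_singleton]
    | cons b u => rw [PySem.Chars.join_cons_cons]; simp_all

theorem pvScanEq (t : List Char) : ∀ d, pvScanBlockB d t = pvBraceLoopA t d := by
  induction t with
  | nil => intro d; cases d <;> simp [pvScanBlockB, pvBraceLoopA]
  | cons c u ih =>
    intro d
    cases d with
    | zero => simp [pvScanBlockB, pvBraceLoopA]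
    | succ d =>
      simp only [pvScanBlockB, pvBraceLoopA, ih]
      split_ifs <;> simp_all

theorem pvWsEq : pvWsB = pvWsA := rfl

theorem pvFindPrefixZero (s sub : List Char) (h : sub <+: s) : PySem.Chars.find s sub = 0 := by
  have hnn : 0 ≤ PySem.Chars.find s sub := (PySem.Chars.find_nonneg_iff s sub).2 h.isInfix
  obtain ⟨h1, h2⟩ := PySem.Chars.find_spec hnn
  by_contra hne
  have hpos : 0 < (PySem.Chars.find s sub).toNat := by omega
  exact (h2 0 hpos) (by simpa using h)

theorem pvPartEq (sid part : List Char) :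
    (if part = ":root".toList ∨ part = "html".toList ∨ part = "*".toList then part
     else if part = "body".toList ∨ PySem.Chars.startswith part "body ".toList = true ∨ PySem.Chars.startswith part "body.".toList = true then
       pvReplace1 part "body".toList ('#' :: sid)
     else ('#' :: sid) ++ [' '] ++ part) = pvScopePartB sid part := by
  have hsw : ∀ p : List Char, p.length = 5 →
      (PySem.Chars.startswith part p = true ↔ part.take 5 = p) := by
    intro p hp
    rw [PySem.Chars.startswith_iff, List.prefix_iff_eq_take, hp]
    exact ⟨fun h => h.symm, fun h => h.symm⟩
  have hbody : (part = "body".toList ∨ PySem.Chars.startswith part "body ".toList = true ∨ PySem.Chars.startswith part "body.".toList = true) ↔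
      (part = "body".toList ∨ part.take 5 = "body ".toList ∨ part.take 5 = "body.".toList) := by
    rw [hsw "body ".toList (by decide), hsw "body.".toList (by decide)]
  unfold pvScopePartB
  by_cases h1 : (part = ":root".toList ∨ part = "html".toList ∨ part = "*".toList)
  · rw [if_pos h1, if_pos h1]
  · rw [if_neg h1, if_neg h1]
    by_cases h2 : (part = "body".toList ∨ PySem.Chars.startswith part "body ".toList = true ∨ PySem.Chars.startswith part "body.".toList = true)
    · rw [if_pos h2, if_pos (hbody.1 h2)]
      have hpre : "body".toList <+: part := by
        rcases h2 with h2 | h2 | h2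
        · exact h2 ▸ List.prefix_refl _
        · exact List.IsPrefix.trans (by decide) ((PySem.Chars.startswith_iff _ _).1 h2)
        · exact List.IsPrefix.trans (by decide) ((PySem.Chars.startswith_iff _ _).1 h2)
      unfold pvReplace1
      rw [pvFindPrefixZero part "body".toList hpre]
      norm_num
      congr 1
    · rw [if_neg h2, if_neg ((not_congr hbody).1 h2)]
      simp

theorem pvSelEq (sel sid : List Char) : pvScopeSelectorA sel sid = pvScopeSelectorB sel sid := by
  unfold pvScopeSelectorA pvScopeSelectorB
  dsimp only
  congr 1
  refine (PySem.List.foldl_congr_mem (g := fun acc part =>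
    if part ≠ ([] : List Char) then acc ++ [pvScopePartB sid part] else acc) _ _ _ ?_).trans ?_
  · intro acc part _
    by_cases hp : part = []
    · simp [hp]
    · dsimp only
      rw [if_pos hp, ← pvPartEq sid part]
      split_ifs <;> rfl
  · rw [PySem.List.foldl_append_ite]
    simp

theorem pvFlatSingletons (w : List Char) : (List.map (fun c => [c]) w).flatten = w := by
  induction w with
  | nil => rfl
  | cons c t ih => simp [ih]

theorem pvMain (n : Nat) : ∀ (cs sid : List Char), cs.length ≤ n →
    PySem.Chars.join [] (pvLoopA cs sid) = ((pvTokenizeB cs).map (pvRenderB sid)).flatten := by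
  induction n with
  | zero =>
    intro cs sid hn
    have hcs : cs = [] := by cases cs <;> simp_all
    subst hcs
    rw [pvLoopA, pvTokenizeB, pvJoinNil]
    simp
  | succ n ih =>
    intro cs sid hn
    rw [pvJoinNil]
    by_cases hcs : cs = []
    · subst hcs
      rw [pvLoopA, pvTokenizeB]
      simp
    · rw [pvLoopA, pvTokenizeB, if_neg hcs]
      dsimp only
      simp only [pvWsEq]
      have hws : ((if cs.takeWhile pvWsA = [] then ([] : List PvSeg) else [.lit (cs.takeWhile pvWsA)]).map (pvRenderB sid)).flatten
          = cs.takeWhile pvWsA := by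
        by_cases hw : cs.takeWhile pvWsA = [] <;> simp [hw, pvRenderB]
      have hws2 : ((cs.takeWhile pvWsA).map (fun c => [c])).flatten = cs.takeWhile pvWsA :=
        pvFlatSingletons _
      have hrlen : (cs.dropWhile pvWsA).length ≤ cs.length := List.length_dropWhile_le _ _
      by_cases hr : cs.dropWhile pvWsA = []
      · rw [dif_pos hr, dif_pos hr, hws, hws2]
      · rw [dif_neg hr, dif_neg hr]
        have hrpos : 0 < (cs.dropWhile pvWsA).length := List.length_pos_of_ne_nil hr
        have hsw : (PySem.Chars.startswith (cs.dropWhile pvWsA) "/*".toList = true) ↔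
            ((cs.dropWhile pvWsA).take 2 = "/*".toList) := by
          rw [PySem.Chars.startswith_iff, List.prefix_iff_eq_take,
            show ("/*".toList).length = 2 from by decide]
          exact eq_comm
        by_cases hc : (cs.dropWhile pvWsA).take 2 = "/*".toList
        · -- comment branch
          rw [if_pos hc, if_pos (hsw.2 hc)]
          have h2le : 2 ≤ (cs.dropWhile pvWsA).length := by
            have := congrArg List.length hc
            simp [List.length_take] at this
            omega
          have hff := PySem.Chars.findFrom_natCast (cs.dropWhile pvWsA) "*/".toList 2 h2le
          rw [show (((2:Nat)):Int) = (2:Int) from rfl] at hff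
          rw [hff]
          by_cases he : PySem.Chars.find ((cs.dropWhile pvWsA).drop 2) "*/".toList = -1
          · rw [if_pos he, if_pos rfl, if_pos he]
            simp only [List.map_append, List.map_cons, List.map_nil, List.flatten_append,
              List.flatten_cons, List.flatten_nil, List.append_nil, hws, hws2, pvRenderB]
          · have hge : 0 ≤ PySem.Chars.find ((cs.dropWhile pvWsA).drop 2) "*/".toList := by
              have := PySem.Chars.neg_one_le_find ((cs.dropWhile pvWsA).drop 2) "*/".toList
              omega
            rw [if_neg he, if_neg (by omega), if_neg he]
            have htn : ((2:Int) + PySem.Chars.find ((cs.dropWhile pvWsA).drop 2) "*/".toList).toNat + 2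
                = (PySem.Chars.find ((cs.dropWhile pvWsA).drop 2) "*/".toList).toNat + 4 := by omega
            rw [htn]
            have hlen : ((cs.dropWhile pvWsA).drop ((PySem.Chars.find ((cs.dropWhile pvWsA).drop 2) "*/".toList).toNat + 4)).length ≤ n := by
              simp only [List.length_drop]
              omega
            have hrec := ih ((cs.dropWhile pvWsA).drop ((PySem.Chars.find ((cs.dropWhile pvWsA).drop 2) "*/".toList).toNat + 4)) sid hlen
            rw [pvJoinNil] at hrec
            simp only [List.map_append, List.map_cons, List.flatten_append, List.flatten_cons,
              List.flatten_nil, List.append_nil, List.append_assoc, hws, hws2, hrec, pvRenderB]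
        · -- rule branch
          rw [if_neg hc, if_neg (fun h => hc (hsw.1 h))]
          by_cases hb : PySem.Chars.find (cs.dropWhile pvWsA) ['{'] = -1
          · rw [if_pos hb, if_pos hb]
            simp only [List.map_append, List.map_cons, List.map_nil, List.flatten_append,
              List.flatten_cons, List.flatten_nil, List.append_nil, hws, hws2, pvRenderB]
          · rw [if_neg hb, if_neg hb, pvScanEq]
            have hlen : ((cs.dropWhile pvWsA).drop ((PySem.Chars.find (cs.dropWhile pvWsA) ['{']).toNat + 1 + pvBraceLoopA ((cs.dropWhile pvWsA).drop ((PySem.Chars.find (cs.dropWhile pvWsA) ['{']).toNat + 1)) 1)).length ≤ n := by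
              simp only [List.length_drop]
              omega
            have hrec := ih _ sid hlen
            rw [pvJoinNil] at hrec
            simp only [List.map_append, List.map_cons, List.flatten_append, List.flatten_cons,
              List.flatten_nil, List.append_nil, List.append_assoc, List.singleton_append,
              List.cons_append, List.nil_append, hws, hws2, hrec, pvRenderB, pvSelEq]

-- ===== VERDICT (by name: the statement is the Claim_ definition above) =====
theorem scope_rules_spec : Claim_equal_scope_rules := by
  intro css sid _
  unfold Spec_scope_rules scope_rules scope_rules_alt
  have h := pvMain css.toList.length css.toList sid.toList le_rfl
  rw [h]
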